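-- pv_equiv track=rewrite | github.com/xingyuli9961/CS262AProject-FlitReduce-NoC_Compression | compresor_lib.py | zero_compressor
-- ===== SOURCE A (Python) =====
-- def zero_compressor(data_flits):
--     delta_flits = []
--     mask = 0
--     for flit in data_flits:
--         if flit == 0:
--             mask += 1
--         else:
--             delta_flits.append(flit)
--         mask = mask << 1
--     return mask, delta_flits
-- ===== SOURCE B (Python) =====
-- def zero_compressor(data_flits):
--     data = list(data_flits)
--     delta_flits = [f for f in data if f != 0]
--     bits = ''.join('1' if f == 0 else '0' for f in data)
--     mask = (int(bits, 2) << 1) if bits else 0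
--     return mask, delta_flits
-- ===== Notes on version B (the rewrite author's own statement) =====
-- stated objective: alternative
-- what changed: Replaces A's single stateful loop (conditional increment/append plus a shift each step) with two independent passes: a filter for the nonzero flits and a binary-string rendering of the zero positions parsed back with int(bits, 2) and shifted once.
import Mathlib
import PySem

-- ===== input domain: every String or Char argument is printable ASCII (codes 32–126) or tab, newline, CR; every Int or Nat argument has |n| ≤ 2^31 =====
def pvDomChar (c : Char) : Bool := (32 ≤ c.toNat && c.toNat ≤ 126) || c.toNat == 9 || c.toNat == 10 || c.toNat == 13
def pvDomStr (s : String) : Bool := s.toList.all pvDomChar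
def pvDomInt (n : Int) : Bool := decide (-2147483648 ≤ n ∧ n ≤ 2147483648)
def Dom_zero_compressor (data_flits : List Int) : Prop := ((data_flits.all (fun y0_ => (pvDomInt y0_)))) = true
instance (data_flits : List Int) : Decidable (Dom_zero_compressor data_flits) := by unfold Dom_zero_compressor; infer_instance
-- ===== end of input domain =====

-- B renders the zero positions as a binary string parsed with int(bits,2) and filters the
-- nonzero flits in a separate pass, instead of A's single stateful shift-and-accumulate loop.


-- ===== PORT A =====
-- for flit in data_flits: if flit == 0: mask += 1 else: delta.append(flit); mask = mask << 1
def zero_compressor (data_flits : List Int) : Int × List Int :=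
  let st := data_flits.foldl
    (fun (st : Int × List Int) flit =>
      let st' := if flit = 0 then (st.1 + 1, st.2) else (st.1, st.2 ++ [flit])
      (st'.1 * 2, st'.2))
    (0, [])
  (st.1, st.2)

-- ===== PORT B =====
-- bits = ''.join('1' if f == 0 else '0' for f in data)
def zc_bits (data : List Int) : List Char :=
  data.map (fun f => if f = 0 then '1' else '0')

-- int(bits, 2): value of the binary digit string
def zc_binval (bits : List Char) : Int :=
  bits.foldl (fun a c => 2 * a + (if c = '1' then 1 else 0)) 0

def zero_compressor_alt (data_flits : List Int) : Int × List Int :=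
  let delta_flits := data_flits.filter (fun f => f ≠ 0)
  let bits := zc_bits data_flits
  let mask : Int := if bits = [] then 0 else zc_binval bits * 2
  (mask, delta_flits)

-- ===== PRECONDITION & SPEC =====
def Spec_zero_compressor (data_flits : List Int) (out : Int × List Int) : Prop := out = zero_compressor_alt data_flits
instance (data_flits : List Int) (out : Int × List Int) : Decidable (Spec_zero_compressor data_flits out) := by unfold Spec_zero_compressor; infer_instance

-- ===== CLAIM (what is proved, stated in full; the proofs are below) =====
def Claim_equal_zero_compressor : Prop := ∀ (data_flits : List Int), Dom_zero_compressor data_flits → Spec_zero_compressor data_flits (zero_compressor data_flits)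

-- ===== LEMMAS AND PROOFS =====

-- shifting the accumulator of the binary-value fold
theorem zc_binval_acc (bits : List Char) (a : Int) :
    bits.foldl (fun a c => 2 * a + (if c = '1' then 1 else 0)) a
      = a * 2 ^ bits.length + zc_binval bits := by
  induction bits generalizing a with
  | nil => simp only [List.foldl_nil, zc_binval, List.length_nil, pow_zero]; ring
  | cons c cs ih =>
    simp only [List.foldl_cons, List.length_cons, zc_binval]
    rw [ih, ih]
    ring

theorem zc_bits_cons (f : Int) (fs : List Int) :
    zc_bits (f :: fs) = (if f = 0 then '1' else '0') :: zc_bits fs := rfl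

theorem zc_bits_length (fs : List Int) : (zc_bits fs).length = fs.length := by
  simp [zc_bits]

theorem zc_binval_cons (c : Char) (cs : List Char) :
    zc_binval (c :: cs) = (if c = '1' then 1 else 0) * 2 ^ cs.length + zc_binval cs := by
  simp only [zc_binval, List.foldl_cons]
  rw [zc_binval_acc]
  norm_num [zc_binval]

-- invariant of A's loop
theorem zc_fold_eq (xs : List Int) (m : Int) (d : List Int) :
    xs.foldl
      (fun (st : Int × List Int) flit =>
        let st' := if flit = 0 then (st.1 + 1, st.2) else (st.1, st.2 ++ [flit])
        (st'.1 * 2, st'.2))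
      (m, d)
      = (m * 2 ^ xs.length + zc_binval (zc_bits xs) * 2,
         d ++ xs.filter (fun f => f ≠ 0)) := by
  induction xs generalizing m d with
  | nil => simp [zc_bits, zc_binval]
  | cons f fs ih =>
    rw [List.foldl_cons]
    by_cases h : f = 0
    · subst h
      rw [if_pos rfl, ih, zc_bits_cons, zc_binval_cons]
      simp only [zc_bits_length, List.filter_cons, List.length_cons, Prod.mk.injEq]
      simp
      ring
    · simp only [if_neg h]
      rw [ih, zc_bits_cons, zc_binval_cons]
      simp only [zc_bits_length, List.filter_cons, List.length_cons, Prod.mk.injEq]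
      simp [h]
      ring

-- ===== VERDICT (by name: the statement is the Claim_ definition above) =====
theorem zero_compressor_spec : Claim_equal_zero_compressor := by
  intro data_flits _
  show _ = _
  simp only [zero_compressor, zero_compressor_alt, zc_fold_eq]
  cases data_flits with
  | nil => simp [zc_bits, zc_binval]
  | cons f fs => simp [zc_bits]
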